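-- pv_equiv track=rewrite | github.com/thruster89/batch_runner | v2/stages/export_stage copy 2.py | preview_sql
-- ===== SOURCE A (Python) =====
-- def preview_sql(sql_text, params, context=5):
--     lines = sql_text.splitlines()
--     hit_lines = []
--
--     for i, line in enumerate(lines):
--         for v in params.values():
--             if str(v) in line:
--                 hit_lines.append(i)
--
--     if not hit_lines:
--         return "\n".join(lines[:10])
--
--     start = max(0, min(hit_lines) - context)
--     end = min(len(lines), max(hit_lines) + context + 1)
--
--     return "\n".join(lines[start:end])
-- ===== SOURCE B (Python) =====
-- def preview_sql(sql_text, params, context=5):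
--     lines = sql_text.splitlines()
--     vals = list(params.values())
--
--     def scan(seq, idx, step):
--         # return the index of the first line of seq containing any param value
--         for line in seq:
--             if any(str(v) in line for v in vals):
--                 return idx
--             idx += step
--         return None
--
--     first = scan(lines, 0, 1)
--     if first is None:
--         return "\n".join(lines[:10])
--     last = scan(list(reversed(lines)), len(lines) - 1, -1)
--     if last is None:
--         last = first
--     start = max(0, first - context)
--     end = min(len(lines), last + context + 1)
--     return "\n".join(lines[start:end])
-- ===== Notes on version B (the rewrite author's own statement) =====
-- stated objective: faster
-- what changed: Replaces the collect-all-hit-indices-then-min/max pass with two early-terminating directed scans: a forward scan for the first hit line and a backward scan (over the reversed list) for the last, never materialising the hit list.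
import Mathlib
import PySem

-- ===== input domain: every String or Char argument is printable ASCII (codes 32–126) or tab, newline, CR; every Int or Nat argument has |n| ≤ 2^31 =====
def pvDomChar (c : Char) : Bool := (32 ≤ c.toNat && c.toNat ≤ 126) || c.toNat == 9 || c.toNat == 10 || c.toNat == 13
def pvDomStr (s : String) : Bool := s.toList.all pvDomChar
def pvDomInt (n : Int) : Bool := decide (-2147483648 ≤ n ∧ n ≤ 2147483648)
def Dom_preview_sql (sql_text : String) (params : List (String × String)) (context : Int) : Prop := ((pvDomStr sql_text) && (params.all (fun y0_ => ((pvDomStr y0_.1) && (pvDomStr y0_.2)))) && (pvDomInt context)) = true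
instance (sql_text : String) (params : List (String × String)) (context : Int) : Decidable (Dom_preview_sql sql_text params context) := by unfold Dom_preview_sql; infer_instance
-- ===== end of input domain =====

-- B replaces A's collect-all-hit-indices-then-min/max pass by two directed scans (forward for the
-- first hit line, backward over the reversed list for the last); same return value, early termination.

-- ===== PORT A =====
def preview_sql (sql_text : String) (params : List (String × String)) (context : Int) : String :=
  let lines := PySem.Str.splitlines sql_text
  let vals := (PySem.Dict.ofList params).values
  let hit_lines : List Int :=
    (PySem.List.enumerate lines 0).foldl
      (fun acc p =>
        vals.foldl (fun acc v => if PySem.Str.isIn v p.2 then acc ++ [p.1] else acc) acc)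
      []
  if hit_lines.isEmpty then
    PySem.Str.join "\n" (PySem.List.slice lines none (some 10))
  else
    let start := max 0 ((PySem.List.min? hit_lines (fun x => x)).getD 0 - context)
    let stop := min (PySem.List.len lines) ((PySem.List.max? hit_lines (fun x => x)).getD 0 + context + 1)
    PySem.Str.join "\n" (PySem.List.slice lines (some start) (some stop))

def pvScan (vals : List String) : List String → Int → Int → Option Int
  | [], _, _ => none
  | l :: t, idx, step =>
    if vals.any (fun v => PySem.Str.isIn v l) then some idx else pvScan vals t (idx + step) step

-- ===== PORT B =====
def preview_sql_alt (sql_text : String) (params : List (String × String)) (context : Int) : String :=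
  let lines := PySem.Str.splitlines sql_text
  let vals := (PySem.Dict.ofList params).values
  match pvScan vals lines 0 1 with
  | none => PySem.Str.join "\n" (PySem.List.slice lines none (some 10))
  | some f =>
    let last := (pvScan vals lines.reverse (PySem.List.len lines - 1) (-1)).getD f
    let start := max 0 (f - context)
    let stop := min (PySem.List.len lines) (last + context + 1)
    PySem.Str.join "\n" (PySem.List.slice lines (some start) (some stop))

-- ===== PRECONDITION & SPEC =====
def Spec_preview_sql (sql_text : String) (params : List (String × String)) (context : Int) (out : String) : Prop := out = preview_sql_alt sql_text params context
instance (sql_text : String) (params : List (String × String)) (context : Int) (out : String) : Decidable (Spec_preview_sql sql_text params context out) := by unfold Spec_preview_sql; infer_instance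

-- ===== CLAIM (what is proved, stated in full; the proofs are below) =====
def Claim_equal_preview_sql : Prop := ∀ (sql_text : String) (params : List (String × String)) (context : Int), Dom_preview_sql sql_text params context → Spec_preview_sql sql_text params context (preview_sql sql_text params context)

-- ===== LEMMAS AND PROOFS =====

def pvHit (vals : List String) (l : String) : Bool := vals.any (fun v => PySem.Str.isIn v l)

def pvHs (vals ls : List String) (s : Int) : List Int :=
  (PySem.List.enumerate ls s).flatMap
    (fun p => (vals.filter (fun v => PySem.Str.isIn v p.2)).map (fun _ => p.1))

theorem pvHs_nil (vals : List String) (s : Int) : pvHs vals [] s = [] := rfl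

theorem pvHs_cons (vals : List String) (l : String) (t : List String) (s : Int) :
    pvHs vals (l :: t) s
      = (vals.filter (fun v => PySem.Str.isIn v l)).map (fun _ => s) ++ pvHs vals t (s + 1) := by
  simp [pvHs, PySem.List.enumerate_cons]

theorem pvHs_append (vals ls ms : List String) (s : Int) :
    pvHs vals (ls ++ ms) s = pvHs vals ls s ++ pvHs vals ms (s + ls.length) := by
  simp [pvHs, PySem.List.enumerate_append]

theorem mem_pvHs_bounds (vals : List String) :
    ∀ (ls : List String) (s x : Int), x ∈ pvHs vals ls s → s ≤ x ∧ x < s + ls.length := by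
  intro ls
  induction ls with
  | nil => intro s x hx; simp [pvHs_nil] at hx
  | cons l t ih =>
    intro s x hx
    rw [pvHs_cons] at hx
    rcases List.mem_append.mp hx with h | h
    · rcases List.mem_map.mp h with ⟨v, _, rfl⟩
      simp only [List.length_cons]
      push_cast
      omega
    · have := ih (s + 1) x h
      simp only [List.length_cons]
      push_cast
      omega

theorem pvScan_eq_none_iff (vals : List String) :
    ∀ (ls : List String) (s st : Int),
      pvScan vals ls s st = none ↔ ∀ l ∈ ls, pvHit vals l = false := by
  intro ls
  induction ls with
  | nil => intro s st; simp [pvScan]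
  | cons l t ih =>
    intro s st
    simp only [pvScan]
    by_cases hh : vals.any (fun v => PySem.Str.isIn v l) = true
    · rw [if_pos hh]
      constructor
      · intro h; exact absurd h (by simp)
      · intro h
        have hl := h l List.mem_cons_self
        simp only [pvHit] at hl
        rw [hl] at hh
        exact (Bool.false_ne_true hh).elim
    · rw [if_neg hh, ih]
      have hl : pvHit vals l = false := Bool.eq_false_iff.mpr hh
      constructor
      · intro h x hx
        rcases List.mem_cons.mp hx with rfl | hx
        · exact hl
        · exact h x hx
      · intro h x hx
        exact h x (List.mem_cons_of_mem _ hx)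

theorem pvHs_eq_nil_iff (vals : List String) :
    ∀ (ls : List String) (s : Int), pvHs vals ls s = [] ↔ ∀ l ∈ ls, pvHit vals l = false := by
  intro ls
  induction ls with
  | nil => intro s; simp [pvHs_nil]
  | cons l t ih =>
    intro s
    rw [pvHs_cons]
    simp only [List.append_eq_nil_iff, List.map_eq_nil_iff, List.filter_eq_nil_iff, ih]
    constructor
    · rintro ⟨h1, h2⟩ x hx
      rcases List.mem_cons.mp hx with rfl | hx
      · simp only [pvHit, List.any_eq_false]
        intro v hv; exact h1 v hv
      · exact h2 x hx
    · intro h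
      refine ⟨?_, fun x hx => h x (List.mem_cons_of_mem _ hx)⟩
      intro v hv
      have := h l List.mem_cons_self
      simp only [pvHit, List.any_eq_false] at this
      exact this v hv

theorem pv_foldl_min_eq :
    ∀ (t : List Int) (x m : Int), (m = x ∨ m ∈ t) → m ≤ x → (∀ y ∈ t, m ≤ y) →
      t.foldl min x = m := by
  intro t
  induction t with
  | nil =>
    intro x m hm _ _
    rcases hm with rfl | hm
    · rfl
    · simp at hm
  | cons y t ih =>
    intro x m hm hx hall
    simp only [List.foldl_cons]
    have hy : m ≤ y := hall y List.mem_cons_self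
    apply ih
    · rcases hm with rfl | hm
      · left; omega
      · rcases List.mem_cons.mp hm with rfl | hm
        · left; omega
        · right; exact hm
    · omega
    · intro z hz; exact hall z (List.mem_cons_of_mem _ hz)

theorem pv_foldl_max_eq :
    ∀ (t : List Int) (x m : Int), (m = x ∨ m ∈ t) → x ≤ m → (∀ y ∈ t, y ≤ m) →
      t.foldl max x = m := by
  intro t
  induction t with
  | nil =>
    intro x m hm _ _
    rcases hm with rfl | hm
    · rfl
    · simp at hm
  | cons y t ih =>
    intro x m hm hx hall
    simp only [List.foldl_cons]
    have hy : y ≤ m := hall y List.mem_cons_self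
    apply ih
    · rcases hm with rfl | hm
      · left; omega
      · rcases List.mem_cons.mp hm with rfl | hm
        · left; omega
        · right; exact hm
    · omega
    · intro z hz; exact hall z (List.mem_cons_of_mem _ hz)

theorem pvScan_forward (vals : List String) :
    ∀ (ls : List String) (s f : Int), pvScan vals ls s 1 = some f →
      f ∈ pvHs vals ls s ∧ ∀ x ∈ pvHs vals ls s, f ≤ x := by
  intro ls
  induction ls with
  | nil => intro s f h; simp [pvScan] at h
  | cons l t ih =>
    intro s f h
    by_cases hh : vals.any (fun v => PySem.Str.isIn v l) = true
    · simp only [pvScan, hh, if_true, Option.some.injEq] at h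
      subst h
      rcases List.any_eq_true.mp hh with ⟨v, hv, hvl⟩
      constructor
      · rw [pvHs_cons]
        apply List.mem_append.mpr; left
        simp only [List.mem_map, List.mem_filter]
        exact ⟨v, ⟨hv, hvl⟩, trivial⟩
      · intro x hx
        rw [pvHs_cons] at hx
        rcases List.mem_append.mp hx with hx | hx
        · have hxs : x = s := by
            simp only [List.mem_map] at hx
            obtain ⟨v', -, h'⟩ := hx
            omega
          omega
        · have := mem_pvHs_bounds vals t (s + 1) x hx; omega
    · simp only [pvScan, hh, if_false, Bool.false_eq_true] at h
      have := ih (s + 1) f h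
      have hfil : vals.filter (fun v => PySem.Str.isIn v l) = [] := by
        simp only [List.filter_eq_nil_iff]
        intro v hv hc
        exact hh (List.any_eq_true.mpr ⟨v, hv, hc⟩)
      rw [pvHs_cons, hfil]
      simpa using this

theorem pvScan_backward (vals : List String) :
    ∀ (ls : List String) (s m : Int),
      pvScan vals ls.reverse (s + ls.length - 1) (-1) = some m →
      m ∈ pvHs vals ls s ∧ ∀ x ∈ pvHs vals ls s, x ≤ m := by
  intro ls
  induction ls using List.reverseRecOn with
  | nil => intro s m h; simp [pvScan] at h
  | append_singleton ys y ih =>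
    intro s m h
    rw [List.reverse_append, List.reverse_singleton] at h
    simp only [List.singleton_append] at h
    have hlen : (s + ((ys ++ [y]).length : Int) - 1) = s + (ys.length : Int) := by
      simp; push_cast; ring
    rw [hlen] at h
    rw [pvHs_append]
    by_cases hh : vals.any (fun v => PySem.Str.isIn v y) = true
    · simp only [pvScan, hh, if_true, Option.some.injEq] at h
      subst h
      rcases List.any_eq_true.mp hh with ⟨v, hv, hvl⟩
      constructor
      · apply List.mem_append.mpr; right
        rw [pvHs_cons]
        apply List.mem_append.mpr; left
        simp only [List.mem_map, List.mem_filter]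
        exact ⟨v, ⟨hv, hvl⟩, trivial⟩
      · intro x hx
        rcases List.mem_append.mp hx with hx | hx
        · have := mem_pvHs_bounds vals ys s x hx; omega
        · rw [pvHs_cons] at hx
          rcases List.mem_append.mp hx with hx | hx
          · have hxs : x = s + (ys.length : Int) := by
              simp only [List.mem_map] at hx
              obtain ⟨v', -, h'⟩ := hx
              omega
            omega
          · simp [pvHs_nil] at hx
    · simp only [pvScan, hh, if_false, Bool.false_eq_true] at h
      have harg : s + (ys.length : Int) + -1 = s + (ys.length : Int) - 1 := by ring
      rw [harg] at h
      have := ih s m h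
      have hfil : vals.filter (fun v => PySem.Str.isIn v y) = [] := by
        simp only [List.filter_eq_nil_iff]
        intro v hv hc
        exact hh (List.any_eq_true.mpr ⟨v, hv, hc⟩)
      rw [pvHs_cons, hfil]
      constructor
      · exact List.mem_append.mpr (Or.inl this.1)
      · intro x hx
        rcases List.mem_append.mp hx with hx | hx
        · exact this.2 x hx
        · simp only [List.map_nil, List.nil_append] at hx
          simp [pvHs_nil] at hx

theorem pv_hit_lines_eq (vals ls : List String) :
    (PySem.List.enumerate ls 0).foldl
      (fun acc p =>
        vals.foldl (fun acc v => if PySem.Str.isIn v p.2 then acc ++ [p.1] else acc) acc)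
      []
      = pvHs vals ls 0 := by
  simp only [PySem.List.foldl_append_if]
  simp only [PySem.List.foldl_append_eq_flatMap]
  simp [pvHs]

theorem pv_min?_eq (L : List Int) (f : Int) (h1 : f ∈ L) (h2 : ∀ x ∈ L, f ≤ x) :
    PySem.List.min? L (fun x => x) = some f := by
  cases L with
  | nil => simp at h1
  | cons x t =>
    rw [PySem.List.min?_id_cons]
    congr 1
    exact pv_foldl_min_eq t x f (List.mem_cons.mp h1)
      (h2 x List.mem_cons_self) (fun y hy => h2 y (List.mem_cons_of_mem _ hy))

theorem pv_max?_eq (L : List Int) (m : Int) (h1 : m ∈ L) (h2 : ∀ x ∈ L, x ≤ m) :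
    PySem.List.max? L (fun x => x) = some m := by
  cases L with
  | nil => simp at h1
  | cons x t =>
    rw [PySem.List.max?_id_cons]
    congr 1
    exact pv_foldl_max_eq t x m (List.mem_cons.mp h1)
      (h2 x List.mem_cons_self) (fun y hy => h2 y (List.mem_cons_of_mem _ hy))

theorem preview_sql_eq_alt (sql_text : String) (params : List (String × String)) (context : Int) :
    preview_sql sql_text params context = preview_sql_alt sql_text params context := by
  unfold preview_sql preview_sql_alt
  set lines := PySem.Str.splitlines sql_text with hlines
  set vals := (PySem.Dict.ofList params).values with hvals
  dsimp only
  rw [pv_hit_lines_eq vals lines]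
  cases hscan : pvScan vals lines 0 1 with
  | none =>
    have hnil : pvHs vals lines 0 = [] :=
      (pvHs_eq_nil_iff vals lines 0).mpr ((pvScan_eq_none_iff vals lines 0 1).mp hscan)
    simp [hnil]
  | some f =>
    obtain ⟨hf_mem, hf_min⟩ := pvScan_forward vals lines 0 f hscan
    have hne : (pvHs vals lines 0).isEmpty = false := by
      cases hL : pvHs vals lines 0 with
      | nil => rw [hL] at hf_mem; simp at hf_mem
      | cons a b => simp
    obtain ⟨l, hl⟩ : ∃ l, pvScan vals lines.reverse (PySem.List.len lines - 1) (-1) = some l := by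
      cases hb : pvScan vals lines.reverse (PySem.List.len lines - 1) (-1) with
      | some l => exact ⟨l, rfl⟩
      | none =>
        exfalso
        have hnoh := (pvScan_eq_none_iff vals lines.reverse _ _).mp hb
        have : pvScan vals lines 0 1 = none :=
          (pvScan_eq_none_iff vals lines 0 1).mpr
            (fun x hx => hnoh x (List.mem_reverse.mpr hx))
        rw [this] at hscan; cases hscan
    have hl' : pvScan vals lines.reverse (0 + (lines.length : Int) - 1) (-1) = some l := by
      rw [show (0 + (lines.length : Int) - 1) = PySem.List.len lines - 1 by
        simp [PySem.List.len_eq]]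
      exact hl
    obtain ⟨hl_mem, hl_max⟩ := pvScan_backward vals lines 0 l hl'
    have hmin : PySem.List.min? (pvHs vals lines 0) (fun x => x) = some f :=
      pv_min?_eq _ _ hf_mem hf_min
    have hmax : PySem.List.max? (pvHs vals lines 0) (fun x => x) = some l :=
      pv_max?_eq _ _ hl_mem hl_max
    rw [PySem.List.len_eq] at hl
    simp [hne, hmin, hmax, hl]

-- ===== VERDICT (by name: the statement is the Claim_ definition above) =====
theorem preview_sql_spec : Claim_equal_preview_sql := by
  intro sql_text params context _
  unfold Spec_preview_sql
  exact preview_sql_eq_alt sql_text params context
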